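-- pv_equiv track=rewrite | github.com/Franktian/leetcode | intersection.py | intersection2
-- ===== SOURCE A (Python) =====
-- def intersection2(nums1, nums2):
--     ht1 = {}
--     ht2 = {}
--
--     for n in nums1:
--         if not ht1.get(n):
--             ht1[n] = 1
--         else:
--             ht1[n] += 1
--
--     res = []
--     for n in nums2:
--         if not ht2.get(n):
--             ht2[n] = 1
--         else:
--             ht2[n] += 1
--
--         if ht1.get(n) and ht2.get(n) <= ht1.get(n):
--             res.append(n)
--
--
--     return res
-- ===== SOURCE B (Python) =====
-- def intersection2(nums1, nums2):
--     pool = list(nums1)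
--     res = []
--     for n in nums2:
--         if n in pool:
--             pool.remove(n)
--             res.append(n)
--     return res
-- ===== Notes on version B (the rewrite author's own statement) =====
-- stated objective: simpler
-- what changed: B does no counting at all: it keeps a mutable pool copy of nums1 and for each nums2 element tests membership and removes one matched occurrence, replacing A's two count dicts and running-count comparison.
import Mathlib
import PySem

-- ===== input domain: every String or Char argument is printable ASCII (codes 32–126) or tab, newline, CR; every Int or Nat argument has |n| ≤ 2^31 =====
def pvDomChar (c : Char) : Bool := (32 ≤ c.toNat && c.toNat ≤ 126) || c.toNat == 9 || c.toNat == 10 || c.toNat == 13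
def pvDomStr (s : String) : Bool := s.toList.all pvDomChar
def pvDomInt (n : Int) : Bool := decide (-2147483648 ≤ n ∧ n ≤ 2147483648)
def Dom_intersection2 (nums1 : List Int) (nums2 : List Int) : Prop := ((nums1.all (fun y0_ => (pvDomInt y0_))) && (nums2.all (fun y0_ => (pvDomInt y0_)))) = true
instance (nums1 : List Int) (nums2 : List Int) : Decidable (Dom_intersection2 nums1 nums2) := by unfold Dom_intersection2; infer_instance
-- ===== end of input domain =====

-- B drops A's two count dicts entirely: it keeps a shrinking pool copy of nums1 and removes one
-- matched occurrence per emitted element (simpler; return value only, neither version mutates its arguments).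

-- ===== PORT A =====
-- 'if not ht.get(n): ht[n] = 1 else: ht[n] += 1' — stored values are ints; get(n) is falsy iff
-- missing or 0, which is exactly getD n 0 = 0.
def bumpA (d : PySem.Dict Int Int) (n : Int) : PySem.Dict Int Int :=
  if d.getD n 0 = 0 then d.insert n 1 else d.insert n (d.getD n 0 + 1)

def intersection2 (nums1 : List Int) (nums2 : List Int) : List Int :=
  let ht1 := nums1.foldl bumpA PySem.Dict.empty
  -- 'if ht1.get(n) and ht2.get(n) <= ht1.get(n)': ht2.get(n) was just set so it is present;
  -- ht1.get(n) truthy iff getD n 0 ≠ 0 (stored values are never 0, so falsy = missing).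
  (nums2.foldl
    (fun (s : PySem.Dict Int Int × List Int) (n : Int) =>
      let ht2 := bumpA s.1 n
      if ht1.getD n 0 ≠ 0 ∧ ht2.getD n 0 ≤ ht1.getD n 0
      then (ht2, s.2 ++ [n]) else (ht2, s.2))
    ((PySem.Dict.empty : PySem.Dict Int Int), ([] : List Int))).2

-- ===== PORT B =====
def intersection2_alt (nums1 : List Int) (nums2 : List Int) : List Int :=
  -- state = (pool, res); 'pool.remove(n)' inside 'if n in pool' removes the first occurrence of a
  -- present element, which is exactly List.erase (PySem.List.remove?_eq_some_erase).
  (nums2.foldl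
    (fun (s : List Int × List Int) (n : Int) =>
      if s.1.contains n then (s.1.erase n, s.2 ++ [n]) else s)
    (nums1, ([] : List Int))).2

-- ===== PRECONDITION & SPEC =====
def Spec_intersection2 (nums1 : List Int) (nums2 : List Int) (out : List Int) : Prop := out = intersection2_alt nums1 nums2
instance (nums1 : List Int) (nums2 : List Int) (out : List Int) : Decidable (Spec_intersection2 nums1 nums2 out) := by unfold Spec_intersection2; infer_instance

-- ===== CLAIM (what is proved, stated in full; the proofs are below) =====
def Claim_equal_intersection2 : Prop := ∀ (nums1 : List Int) (nums2 : List Int), Dom_intersection2 nums1 nums2 → Spec_intersection2 nums1 nums2 (intersection2 nums1 nums2)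

-- ===== LEMMAS AND PROOFS =====

-- abstract form of A's second loop: t is the running ht2 count, c the ht1 count
def specA (c t : Int → Int) : List Int → List Int
  | [] => []
  | x :: xs => (if c x ≠ 0 ∧ t x + 1 ≤ c x then [x] else [])
      ++ specA c (fun m => if m = x then t m + 1 else t m) xs

-- abstract counting form of B's loop: b is the remaining budget for each value
def specB (b : Int → Int) : List Int → List Int
  | [] => []
  | x :: xs => if 0 < b x then x :: specB (fun m => if m = x then b m - 1 else b m) xs
               else specB b xs

-- B's loop on the actual pool list
def specC (pool : List Int) : List Int → List Int
  | [] => []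
  | x :: xs => if pool.contains x then x :: specC (pool.erase x) xs else specC pool xs

theorem bumpA_getD (d : PySem.Dict Int Int) (x m : Int) :
    (bumpA d x).getD m 0 = if m = x then d.getD x 0 + 1 else d.getD m 0 := by
  unfold bumpA
  by_cases h0 : d.getD x 0 = 0 <;> by_cases hm : m = x <;>
    simp [h0, hm, PySem.Dict.getD_insert]

theorem countFold_getD (l : List Int) (d : PySem.Dict Int Int) (n : Int) :
    (l.foldl bumpA d).getD n 0 = d.getD n 0 + l.count n := by
  induction l generalizing d with
  | nil => simp
  | cons x xs ih =>
    rw [List.foldl_cons, ih, bumpA_getD, List.count_cons]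
    by_cases h : n = x
    · simp [h]; omega
    · simp [h, Ne.symm h]

theorem loopA_eq_specA (c : Int → Int) (l : List Int) (d2 : PySem.Dict Int Int)
    (res : List Int) :
    (l.foldl
      (fun (s : PySem.Dict Int Int × List Int) (n : Int) =>
        let ht2 := bumpA s.1 n
        if c n ≠ 0 ∧ ht2.getD n 0 ≤ c n
        then (ht2, s.2 ++ [n]) else (ht2, s.2))
      (d2, res)).2 = res ++ specA c (fun m => d2.getD m 0) l := by
  induction l generalizing d2 res with
  | nil => simp [specA]
  | cons x xs ih =>
    simp only [List.foldl_cons, specA]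
    have hb : ∀ m, (bumpA d2 x).getD m 0 = if m = x then d2.getD m 0 + 1 else d2.getD m 0 := by
      intro m; rw [bumpA_getD]; split_ifs with h <;> simp [h]
    have hbx : (bumpA d2 x).getD x 0 = d2.getD x 0 + 1 := by rw [hb]; simp
    have hfun : (fun m => (bumpA d2 x).getD m 0)
        = (fun m => if m = x then d2.getD m 0 + 1 else d2.getD m 0) := funext hb
    by_cases h : c x ≠ 0 ∧ d2.getD x 0 + 1 ≤ c x
    · rw [if_pos (by rw [hbx]; exact h)]
      rw [ih, hfun]
      have h2 : d2.getD x 0 < c x := by omega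
      simp [h.1, h2]
    · rw [if_neg (by rw [hbx]; exact h)]
      rw [ih, hfun]
      beta_reduce
      rw [if_neg h]
      simp

theorem loopC_eq_specC (l : List Int) (pool : List Int) (res : List Int) :
    (l.foldl
      (fun (s : List Int × List Int) (n : Int) =>
        if s.1.contains n then (s.1.erase n, s.2 ++ [n]) else s)
      (pool, res)).2 = res ++ specC pool l := by
  induction l generalizing pool res with
  | nil => simp [specC]
  | cons x xs ih =>
    simp only [List.foldl_cons, specC]
    by_cases h : pool.contains x
    · rw [if_pos h, ih, if_pos h]; simp
    · rw [if_neg h, ih, if_neg h]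

theorem specC_eq_specB (l : List Int) (pool : List Int) :
    specC pool l = specB (fun m => (pool.count m : Int)) l := by
  induction l generalizing pool with
  | nil => simp [specC, specB]
  | cons x xs ih =>
    simp only [specC, specB]
    by_cases h : x ∈ pool
    · have hc : 0 < pool.count x := List.count_pos_iff.mpr h
      rw [if_pos (by simpa using h), if_pos (by exact_mod_cast hc), ih]
      congr 1
      congr 1
      funext m
      by_cases hm : m = x
      · subst hm
        rw [List.count_erase_self]
        omega
      · rw [List.count_erase_of_ne hm]
        simp [hm]
    · have hc : pool.count x = 0 := List.count_eq_zero.mpr h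
      rw [if_neg (by simpa using h), if_neg (by simp [hc]), ih]

theorem specA_eq_specB (l : List Int) (c t : Int → Int)
    (hc : ∀ n, 0 ≤ c n) (ht : ∀ n, 0 ≤ t n) :
    specA c t l = specB (fun n => max (c n - t n) 0) l := by
  induction l generalizing t with
  | nil => simp [specA, specB]
  | cons x xs ih =>
    simp only [specA, specB]
    have ht' : ∀ n, 0 ≤ (fun m => if m = x then t m + 1 else t m) n := by
      intro n; dsimp only; split_ifs <;> (have := ht n; omega)
    by_cases h : t x < c x
    · rw [if_pos ⟨by have := ht x; omega, by omega⟩, if_pos (by have := ht x; omega)]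
      rw [ih _ ht']
      simp only [List.cons_append, List.nil_append]
      congr 2; funext n
      by_cases hn : n = x <;> simp [hn] <;> omega
    · rw [if_neg (by intro hh; omega), if_neg (by omega)]
      rw [ih _ ht']
      simp only [List.nil_append]
      congr 1; funext n
      by_cases hn : n = x <;> simp [hn]
      have := ht n; have := hc n; omega

-- ===== VERDICT (by name: the statement is the Claim_ definition above) =====
theorem intersection2_spec : Claim_equal_intersection2 := by
  intro nums1 nums2 _
  unfold Spec_intersection2 intersection2 intersection2_alt
  rw [loopA_eq_specA, loopC_eq_specC]
  simp only [List.nil_append]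
  have hA : (fun m => ((nums1.foldl bumpA PySem.Dict.empty).getD m 0)) =
      (fun m => (nums1.count m : Int)) := by
    funext m; rw [countFold_getD]; simp
  have hE : (fun m => (PySem.Dict.empty : PySem.Dict Int Int).getD m 0) = (fun _ : Int => (0 : Int)) := by
    funext m; simp
  rw [hA, hE, specA_eq_specB nums2 _ _ (fun n => Int.natCast_nonneg _) (fun n => le_refl 0),
      specC_eq_specB]
  congr 1; funext n
  have := Int.natCast_nonneg (nums1.count n); omega
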